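-- pv_equiv track=rewrite | github.com/mouru04/MedSynthAI | research/Draw/draw_t2t3_combined_distribution.py | extract_t2t3_rounds
-- ===== SOURCE A (Python) =====
-- def extract_t2t3_rounds(cases):
--     t2_done, t3_done = [], []   # ≤30轮完成
--     t2_uf,  t3_uf  = 0, 0       # >30轮仍未完成
--
--     for c in cases:
--         # T2
--         r2 = c.get('t2_done_round')
--         if r2 is not None and 1 <= r2 <= 30:
--             t2_done.append(r2)
--         elif r2 is None:          # 未完成：认为>30
--             t2_uf += 1
--
--         # T3
--         r3 = c.get('t3_done_round')
--         if r3 is not None and 1 <= r3 <= 30: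
--             t3_done.append(r3)
--         elif r3 is None:
--             t3_uf += 1
--
--     return t2_done, t3_done, t2_uf, t3_uf
-- ===== SOURCE B (Python) =====
-- def _done(cases, key):
--     return [r for r in (c.get(key) for c in cases) if r is not None and 1 <= r <= 30]
--
-- def _unfinished(cases, key):
--     return sum(1 for c in cases if c.get(key) is None)
--
-- def extract_t2t3_rounds(cases):
--     return (_done(cases, 't2_done_round'), _done(cases, 't3_done_round'),
--             _unfinished(cases, 't2_done_round'), _unfinished(cases, 't3_done_round'))
-- ===== Notes on version B (the rewrite author's own statement) =====
-- stated objective: simpler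
-- what changed: Replaced the single interleaved stateful loop with four independent comprehension-style passes (a filtered generator for each done-list, a sum-of-1s count for each unfinished counter), so there is no mutable accumulator tuple at all.
import Mathlib
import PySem

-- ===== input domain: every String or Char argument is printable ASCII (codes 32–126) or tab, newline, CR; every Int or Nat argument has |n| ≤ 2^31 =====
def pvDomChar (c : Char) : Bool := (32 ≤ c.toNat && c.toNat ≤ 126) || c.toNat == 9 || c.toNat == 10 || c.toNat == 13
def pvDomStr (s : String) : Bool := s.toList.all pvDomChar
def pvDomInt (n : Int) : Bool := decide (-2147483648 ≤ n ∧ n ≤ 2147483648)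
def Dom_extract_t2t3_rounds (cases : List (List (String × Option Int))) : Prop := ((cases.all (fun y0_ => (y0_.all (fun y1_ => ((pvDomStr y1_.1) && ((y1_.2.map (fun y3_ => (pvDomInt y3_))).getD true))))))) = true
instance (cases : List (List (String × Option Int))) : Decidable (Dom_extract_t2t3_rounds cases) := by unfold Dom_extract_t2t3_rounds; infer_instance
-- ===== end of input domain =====

-- B replaces A's single interleaved stateful loop by four independent filtered passes (one per output component): simpler decomposition, same O(n) cost.


-- ===== PORT A =====
-- c.get(k): first matching key; a stored None and a missing key both give Python None
def pvGet (c : List (String × Option Int)) (k : String) : Option Int :=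
  match c.find? (fun p => p.1 == k) with
  | some p => p.2
  | none => none

-- the body of A's for-loop: update the (t2_done, t3_done, t2_uf, t3_uf) state by one case
def pvStep (st : List Int × List Int × Int × Int) (c : List (String × Option Int)) :
    List Int × List Int × Int × Int :=
  let st :=
    match pvGet c "t2_done_round" with
    | some v => if 1 ≤ v ∧ v ≤ 30 then (st.1 ++ [v], st.2.1, st.2.2.1, st.2.2.2) else st
    | none => (st.1, st.2.1, st.2.2.1 + 1, st.2.2.2)
  match pvGet c "t3_done_round" with
  | some v => if 1 ≤ v ∧ v ≤ 30 then (st.1, st.2.1 ++ [v], st.2.2.1, st.2.2.2) else st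
  | none => (st.1, st.2.1, st.2.2.1, st.2.2.2 + 1)

def extract_t2t3_rounds (cases : List (List (String × Option Int))) : List Int × List Int × Int × Int :=
  cases.foldl pvStep ([], [], 0, 0)

-- ===== PORT B =====
def pvDone (cases : List (List (String × Option Int))) (key : String) : List Int :=
  (cases.map (fun c => pvGet c key)).filterMap (fun r =>
    match r with
    | some v => if 1 ≤ v ∧ v ≤ 30 then some v else none
    | none => none)

def pvUnfinished (cases : List (List (String × Option Int))) (key : String) : Int :=
  ((cases.filter (fun c => pvGet c key = none)).length : Int)

def extract_t2t3_rounds_alt (cases : List (List (String × Option Int))) : List Int × List Int × Int × Int :=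
  (pvDone cases "t2_done_round", pvDone cases "t3_done_round",
   pvUnfinished cases "t2_done_round", pvUnfinished cases "t3_done_round")

-- ===== PRECONDITION & SPEC =====
def Spec_extract_t2t3_rounds (cases : List (List (String × Option Int))) (out : List Int × List Int × Int × Int) : Prop := out = extract_t2t3_rounds_alt cases
instance (cases : List (List (String × Option Int))) (out : List Int × List Int × Int × Int) : Decidable (Spec_extract_t2t3_rounds cases out) := by unfold Spec_extract_t2t3_rounds; infer_instance

-- ===== CLAIM (what is proved, stated in full; the proofs are below) =====
def Claim_equal_extract_t2t3_rounds : Prop := ∀ (cases : List (List (String × Option Int))), Dom_extract_t2t3_rounds cases → Spec_extract_t2t3_rounds cases (extract_t2t3_rounds cases)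

-- ===== LEMMAS AND PROOFS =====
theorem pvDone_cons (c : List (String × Option Int)) (rest : List (List (String × Option Int))) (k : String) :
    pvDone (c :: rest) k =
      (match pvGet c k with
       | some v => if 1 ≤ v ∧ v ≤ 30 then v :: pvDone rest k else pvDone rest k
       | none => pvDone rest k) := by
  simp only [pvDone, List.map_cons, List.filterMap_cons]
  rcases pvGet c k with _ | v
  · rfl
  · by_cases h : 1 ≤ v ∧ v ≤ 30 <;> simp [h]

theorem pvUnfinished_cons (c : List (String × Option Int)) (rest : List (List (String × Option Int))) (k : String) :
    pvUnfinished (c :: rest) k =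
      (if pvGet c k = none then 1 + pvUnfinished rest k else pvUnfinished rest k) := by
  simp only [pvUnfinished, List.filter_cons]
  by_cases h : pvGet c k = none <;> simp [h] <;> omega

theorem extract_foldl_general (cases : List (List (String × Option Int)))
    (a b : List Int) (x y : Int) :
    cases.foldl pvStep (a, b, x, y)
    = (a ++ pvDone cases "t2_done_round", b ++ pvDone cases "t3_done_round",
       x + pvUnfinished cases "t2_done_round", y + pvUnfinished cases "t3_done_round") := by
  induction cases generalizing a b x y with
  | nil => simp [pvDone, pvUnfinished]
  | cons c rest ih =>
    simp only [List.foldl_cons]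
    rw [pvDone_cons, pvDone_cons, pvUnfinished_cons, pvUnfinished_cons]
    rcases h2 : pvGet c "t2_done_round" with _ | v2 <;>
      rcases h3 : pvGet c "t3_done_round" with _ | v3 <;>
      simp only [pvStep, h2, h3]
    · rw [ih]
      simp only [Prod.mk.injEq, true_and]
      exact ⟨by simp; ring, by simp; ring⟩
    · by_cases hr3 : 1 ≤ v3 ∧ v3 ≤ 30 <;> simp only [hr3, if_pos, if_neg, if_true, if_false] <;>
        rw [ih] <;> simp [hr3, List.append_assoc] <;> ring
    · by_cases hr2 : 1 ≤ v2 ∧ v2 ≤ 30 <;> simp only [hr2, if_true, if_false] <;>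
        rw [ih] <;> simp [hr2, List.append_assoc] <;> ring
    · by_cases hr2 : 1 ≤ v2 ∧ v2 ≤ 30 <;> by_cases hr3 : 1 ≤ v3 ∧ v3 ≤ 30 <;>
        simp only [hr2, hr3, if_true, if_false] <;>
        rw [ih] <;> simp [hr2, hr3, List.append_assoc]

-- ===== VERDICT (by name: the statement is the Claim_ definition above) =====
theorem extract_t2t3_rounds_spec : Claim_equal_extract_t2t3_rounds := by
  intro cases _
  unfold Spec_extract_t2t3_rounds extract_t2t3_rounds extract_t2t3_rounds_alt
  rw [extract_foldl_general]
  simp
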